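-- pv_equiv track=rewrite | github.com/Patokaz/Lema-do-Bombeamento | lemaBombeamento.py | linguagem_an_bn
-- ===== SOURCE A (Python) =====
-- def linguagem_an_bn(w):
--     """
--     L = { a^n b^n | n ≥ 0 }
--     """
--     a_count = 0
--     b_count = 0
--     state = "a"
--
--     for c in w:
--         if c == 'a':
--             if state != "a":
--                 return False
--             a_count += 1
--         elif c == 'b':
--             state = "b"
--             b_count += 1
--         else:
--             return False
--     return a_count == b_count
-- ===== SOURCE B (Python) =====
-- def linguagem_an_bn(w):
--     n = len(w)
--     if n % 2:
--         return False
--     h = n // 2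
--     return all(c == 'a' for c in w[:h]) and all(c == 'b' for c in w[h:])
-- ===== Notes on version B (the rewrite author's own statement) =====
-- stated objective: simpler
-- what changed: Replaces the stateful single-pass counting automaton with a length-split check: even length, first half all 'a', second half all 'b'.
import Mathlib
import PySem

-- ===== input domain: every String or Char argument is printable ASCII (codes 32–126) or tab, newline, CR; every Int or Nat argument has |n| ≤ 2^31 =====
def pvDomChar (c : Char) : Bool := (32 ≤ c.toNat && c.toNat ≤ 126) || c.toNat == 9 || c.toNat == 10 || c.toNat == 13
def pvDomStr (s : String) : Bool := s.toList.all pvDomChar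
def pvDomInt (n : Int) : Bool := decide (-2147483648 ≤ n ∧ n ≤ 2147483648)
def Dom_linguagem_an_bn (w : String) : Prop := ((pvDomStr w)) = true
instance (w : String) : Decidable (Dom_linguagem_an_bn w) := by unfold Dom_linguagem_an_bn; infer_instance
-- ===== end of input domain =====

-- B replaces A's stateful single-pass counting automaton with a length split plus two half scans (objective: simpler).

-- ===== PORT A =====
-- the for-loop of A: state is (a_count, b_count, state); early returns become `false` results
def linguagem_an_bn_go (l : List Char) (a_count b_count : Int) (state : String) : Bool :=
  match l with
  | [] => a_count == b_count
  | c :: rest =>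
    if c == 'a' then
      if state != "a" then false
      else linguagem_an_bn_go rest (a_count + 1) b_count state
    else if c == 'b' then
      linguagem_an_bn_go rest a_count (b_count + 1) "b"
    else false

def linguagem_an_bn (w : String) : Bool :=
  linguagem_an_bn_go w.toList 0 0 "a"

-- ===== PORT B =====
def linguagem_an_bn_alt (w : String) : Bool :=
  let n : Int := (w.toList.length : Int)
  if PySem.Int.mod n 2 != 0 then false
  else
    let h : Int := PySem.Int.floordiv n 2
    (PySem.Str.slice w none (some h)).toList.all (fun c => c == 'a') &&
    (PySem.Str.slice w (some h) none).toList.all (fun c => c == 'b')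

-- ===== PRECONDITION & SPEC =====
def Spec_linguagem_an_bn (w : String) (out : Bool) : Prop := out = linguagem_an_bn_alt w
instance (w : String) (out : Bool) : Decidable (Spec_linguagem_an_bn w out) := by unfold Spec_linguagem_an_bn; infer_instance

-- ===== CLAIM (what is proved, stated in full; the proofs are below) =====
def Claim_equal_linguagem_an_bn : Prop := ∀ (w : String), Dom_linguagem_an_bn w → Spec_linguagem_an_bn w (linguagem_an_bn w)

-- ===== LEMMAS AND PROOFS =====

theorem strSlice_take (w : String) (h : Nat) :
    (PySem.Str.slice w none (some (h : Int))).toList = w.toList.take h := by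
  simp [PySem.Str.slice, PySem.Chars.slice, PySem.List.slice_to_natCast]

theorem strSlice_drop (w : String) (h : Nat) :
    (PySem.Str.slice w (some (h : Int)) none).toList = w.toList.drop h := by
  simp [PySem.Str.slice, PySem.Chars.slice, PySem.List.slice_from_natCast]

-- in state "b" the loop accepts exactly a trailing block of 'b's balancing the counts
theorem go_state_b (l : List Char) (a b : Int) :
    linguagem_an_bn_go l a b "b"
      = (l.all (fun c => c == 'b') && (a == b + l.length)) := by
  induction l generalizing b with
  | nil => simp [linguagem_an_bn_go]
  | cons c rest ih =>
    by_cases hc : c = 'a'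
    · subst hc; simp [linguagem_an_bn_go]
    · by_cases hb : c = 'b'
      · subst hb
        simp [linguagem_an_bn_go, ih]
        rw [show b + 1 + (rest.length : Int) = b + ((rest.length : Int) + 1) from by ring]
      · simp [linguagem_an_bn_go, hc, hb]

-- in state "a" the loop result in terms of takeWhile/dropWhile
theorem go_state_a (l : List Char) (a b : Int) :
    linguagem_an_bn_go l a b "a"
      = ((l.dropWhile (fun c => c == 'a')).all (fun c => c == 'b')
          && (a + (l.takeWhile (fun c => c == 'a')).length
                == b + (l.dropWhile (fun c => c == 'a')).length)) := by
  induction l generalizing a b with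
  | nil => simp [linguagem_an_bn_go]
  | cons c rest ih =>
    by_cases hc : c = 'a'
    · subst hc
      simp [linguagem_an_bn_go, ih, List.takeWhile, List.dropWhile]
      rw [show a + 1 + ((List.takeWhile (fun c => c == 'a') rest).length : Int)
            = a + (((List.takeWhile (fun c => c == 'a') rest).length : Int) + 1) from by ring]
    · by_cases hb : c = 'b'
      · subst hb
        rw [show linguagem_an_bn_go ('b' :: rest) a b "a"
              = linguagem_an_bn_go rest a (b + 1) "b" from rfl]
        rw [go_state_b]
        simp [List.takeWhile, List.dropWhile]
        rw [show b + 1 + (rest.length : Int) = b + ((rest.length : Int) + 1) from by ring]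
      · have hca : (c == 'a') = false := by simp [hc]
        have hcb : (c == 'b') = false := by simp [hb]
        simp [linguagem_an_bn_go, hca, hcb, List.takeWhile, List.dropWhile]

theorem take_all_drop_all (l : List Char) (h : Nat) (hh : h + h = l.length)
    (ha : (l.take h).all (fun c => c == 'a') = true)
    (hb : (l.drop h).all (fun c => c == 'b') = true) :
    l.takeWhile (fun c => c == 'a') = l.take h ∧
    l.dropWhile (fun c => c == 'a') = l.drop h := by
  have hl : l = l.take h ++ l.drop h := (List.take_append_drop h l).symm
  have htw : l.takeWhile (fun c => c == 'a') = l.take h := by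
    rw [hl, List.takeWhile_append]
    cases hd : l.drop h with
    | nil => simp [List.takeWhile_eq_self_iff.mpr (List.all_eq_true.mp ha)]
    | cons x xs =>
      have hx : x = 'b' := by
        have := hb; rw [hd] at this; simp [List.all_cons] at this; exact this.1
      have hlen : (l.take h).length = h := by
        rw [List.length_take]; omega
      simp [List.takeWhile_eq_self_iff.mpr (List.all_eq_true.mp ha), hlen, List.takeWhile, hx]
  refine ⟨htw, ?_⟩
  have := List.takeWhile_append_dropWhile (p := fun c => c == 'a') (l := l)
  -- dropWhile = drop h since takeWhile has length h
  have hlen : (l.takeWhile (fun c => c == 'a')).length = h := by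
    rw [htw, List.length_take]; omega
  calc l.dropWhile (fun c => c == 'a')
      = (l.takeWhile (fun c => c == 'a') ++ l.dropWhile (fun c => c == 'a')).drop h := by
        rw [List.drop_append_of_le_length (by omega)]
        simp [hlen]
    _ = l.drop h := by rw [this]

theorem main_list (l : List Char) :
    linguagem_an_bn_go l 0 0 "a"
      = (if l.length % 2 ≠ 0 then false
         else ((l.take (l.length / 2)).all (fun c => c == 'a')
               && (l.drop (l.length / 2)).all (fun c => c == 'b'))) := by
  rw [go_state_a]
  have hsum : (l.takeWhile (fun c => c == 'a')).length
      + (l.dropWhile (fun c => c == 'a')).length = l.length := by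
    have h2 := congrArg List.length
      (List.takeWhile_append_dropWhile (p := fun c => c == 'a') (l := l))
    rw [List.length_append] at h2
    exact h2
  by_cases hodd : l.length % 2 = 0
  · rw [if_neg (by simp [hodd])]
    set h := l.length / 2 with hh
    have hhh : h + h = l.length := by omega
    apply Bool.eq_iff_iff.mpr
    constructor
    · intro hyp
      simp only [Bool.and_eq_true, beq_iff_eq] at hyp
      obtain ⟨hall, heq⟩ := hyp
      have htl : (l.takeWhile (fun c => c == 'a')).length = h := by
        have := heq; push_cast at this; omega
      have htake : l.takeWhile (fun c => c == 'a') = l.take h := by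
        have h2 := List.prefix_iff_eq_take.mp
          (List.takeWhile_prefix (p := fun c => c == 'a') (l := l))
        rw [htl] at h2; exact h2
      have hdrop : l.dropWhile (fun c => c == 'a') = l.drop h := by
        calc l.dropWhile (fun c => c == 'a')
            = (l.takeWhile (fun c => c == 'a') ++ l.dropWhile (fun c => c == 'a')).drop h := by
              rw [List.drop_append_of_le_length (by omega)]
              simp [htl]
          _ = l.drop h := by rw [List.takeWhile_append_dropWhile]
      simp only [Bool.and_eq_true]
      refine ⟨?_, by rw [← hdrop]; exact hall⟩
      rw [← htake]
      exact List.all_takeWhile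
    · intro hyp
      simp only [Bool.and_eq_true] at hyp
      obtain ⟨ha, hb⟩ := hyp
      obtain ⟨htake, hdrop⟩ := take_all_drop_all l h hhh ha hb
      have hlt : (l.take h).length = h := by rw [List.length_take]; omega
      simp only [Bool.and_eq_true, beq_iff_eq]
      refine ⟨by rw [hdrop]; exact hb, ?_⟩
      rw [htake, hdrop, hlt, List.length_drop]
      norm_num; omega
  · rw [if_pos (by simp [hodd])]
    simp only [Bool.and_eq_false_iff]
    right
    simp only [beq_eq_false_iff_ne, ne_eq]
    intro h
    omega

-- ===== VERDICT (by name: the statement is the Claim_ definition above) =====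
theorem linguagem_an_bn_spec : Claim_equal_linguagem_an_bn := by
  intro w _
  unfold Spec_linguagem_an_bn linguagem_an_bn linguagem_an_bn_alt
  rw [main_list]
  have hmod : PySem.Int.mod ((w.toList.length : Int)) 2
      = ((w.toList.length % 2 : Nat) : Int) := by
    exact_mod_cast PySem.Int.mod_natCast w.toList.length 2
  have hdiv : PySem.Int.floordiv ((w.toList.length : Int)) 2
      = ((w.toList.length / 2 : Nat) : Int) := by
    exact_mod_cast PySem.Int.floordiv_natCast w.toList.length 2
  simp only [hmod, hdiv]
  by_cases hodd : w.toList.length % 2 = 0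
  · rw [show ((w.toList.length % 2 : Nat) : Int) = 0 from by exact_mod_cast hodd]
    simp only [bne_self_eq_false, Bool.false_eq_true, if_false]
    rw [if_neg (by omega), strSlice_take, strSlice_drop]
  · rw [if_pos hodd]
    rw [show ((w.toList.length % 2 : Nat) : Int) = 1 from by
      exact_mod_cast Nat.mod_two_ne_zero.mp hodd]
    simp
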